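-- pv_equiv track=rewrite | github.com/Cacatuaa/4Fun | faculdade_maria_clara/lab10.py | marcaQuadrado
-- ===== SOURCE A (Python) =====
-- def calculaDistancia(ponto1, ponto2):
--     return max(abs(ponto1[0] - ponto2[0]), abs(ponto1[1] - ponto2[1]))
--
-- def marcaQuadrado(quadrado, terreno):
--     x, y = quadrado[1], quadrado[2]
--     tamanho = quadrado[0]
--     for i in range(len(terreno)):
--         for j in range(len(terreno[i])):
--             if calculaDistancia((x, y), (i, j)) == tamanho:
--                 terreno[i][j] = '*'
--     return terreno
-- ===== SOURCE B (Python) =====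
-- # Marks only the square ring perimeter at radius quadrado[0], clamped to the grid,
-- # instead of scanning every cell. Mutates terreno in place like A.
-- def marcaQuadrado(quadrado, terreno):
--     t, x, y = quadrado[0], quadrado[1], quadrado[2]
--
--     def mark(i, j):
--         if 0 <= i < len(terreno) and 0 <= j < len(terreno[i]):
--             terreno[i][j] = '*'
--
--     def mark_row(i, j0, j1):
--         if 0 <= i < len(terreno):
--             row = terreno[i]
--             for j in range(max(j0, 0), min(j1, len(row) - 1) + 1):
--                 row[j] = '*'
--
--     mark_row(x - t, y - t, y + t)
--     mark_row(x + t, y - t, y + t)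
--     for i in range(max(x - t + 1, 0), min(x + t - 1, len(terreno) - 1) + 1):
--         mark(i, y - t)
--         mark(i, y + t)
--     return terreno
-- ===== Notes on version B (the rewrite author's own statement) =====
-- stated objective: faster
-- what changed: Instead of scanning every cell of the grid and testing its Chebyshev distance, B walks only the square ring perimeter at radius quadrado[0] and marks each perimeter cell after a bounds check, so work is proportional to the ring size, not the grid size.
import Mathlib
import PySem

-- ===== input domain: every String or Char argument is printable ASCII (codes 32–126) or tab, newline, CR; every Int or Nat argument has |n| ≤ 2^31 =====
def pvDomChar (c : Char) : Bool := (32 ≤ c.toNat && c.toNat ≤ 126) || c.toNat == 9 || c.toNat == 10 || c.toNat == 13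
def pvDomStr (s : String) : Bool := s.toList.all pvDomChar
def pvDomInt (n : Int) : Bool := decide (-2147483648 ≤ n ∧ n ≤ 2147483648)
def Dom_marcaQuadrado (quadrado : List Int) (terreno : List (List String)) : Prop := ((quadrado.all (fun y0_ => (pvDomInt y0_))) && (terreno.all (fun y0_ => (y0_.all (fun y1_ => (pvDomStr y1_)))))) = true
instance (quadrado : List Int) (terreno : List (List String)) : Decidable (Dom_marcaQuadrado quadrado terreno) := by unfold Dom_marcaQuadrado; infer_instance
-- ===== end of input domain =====

-- B walks only the square ring perimeter at radius quadrado[0] (bounds-checked) instead of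
-- scanning the whole grid; A mutates `terreno` in place (B does the same in Python) — the
-- equivalence proved here is about the returned grid.

-- ===== PORT A =====
def calculaDistancia (ponto1 ponto2 : Int × Int) : Int :=
  max |ponto1.1 - ponto2.1| |ponto1.2 - ponto2.2|

def marcaQuadrado (quadrado : List Int) (terreno : List (List String)) : List (List String) :=
  match PySem.List.pyGet? quadrado 1, PySem.List.pyGet? quadrado 2, PySem.List.pyGet? quadrado 0 with
  | some x, some y, some tamanho =>
    (List.range terreno.length).foldl (fun (g : List (List String)) (i : Nat) =>
      (List.range (g.getD i []).length).foldl (fun (g' : List (List String)) (j : Nat) =>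
        if calculaDistancia (x, y) ((i : Int), (j : Int)) = tamanho then
          g'.set i ((g'.getD i []).set j "*")
        else g') g) terreno
  | _, _, _ => terreno

-- ===== PORT B =====
-- bounds-checked single-cell mark (Source B's `mark`)
def markCell (g : List (List String)) (i j : Int) : List (List String) :=
  if 0 ≤ i ∧ i < (g.length : Int) ∧ 0 ≤ j ∧ j < ((g.getD i.toNat []).length : Int) then
    g.set i.toNat ((g.getD i.toNat []).set j.toNat "*")
  else g

-- mark columns j0..j1 of row i, clamped to the grid (Source B's `mark_row`)
def markRow (g : List (List String)) (i j0 j1 : Int) : List (List String) :=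
  if 0 ≤ i ∧ i < (g.length : Int) then
    g.set i.toNat
      ((PySem.List.pyRange (max j0 0) (min j1 (((g.getD i.toNat []).length : Int) - 1) + 1) 1).foldl
        (fun row j => row.set j.toNat "*") (g.getD i.toNat []))
  else g

def marcaQuadrado_alt (quadrado : List Int) (terreno : List (List String)) : List (List String) :=
  match PySem.List.pyGet? quadrado 0 with
  | none => terreno
  | some t =>
    match PySem.List.pyGet? quadrado 1 with
    | none => terreno
    | some x =>
      match PySem.List.pyGet? quadrado 2 with
      | none => terreno
      | some y =>
        let g1 := markRow (markRow terreno (x - t) (y - t) (y + t)) (x + t) (y - t) (y + t)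
        (PySem.List.pyRange (max (x - t + 1) 0) (min (x + t - 1) ((terreno.length : Int) - 1) + 1) 1).foldl
          (fun g i => markCell (markCell g i (y - t)) i (y + t)) g1

-- ===== PRECONDITION & SPEC =====
-- Pre_ excludes only quadrado with fewer than 3 entries, where Python A raises IndexError.
def Pre_marcaQuadrado (quadrado : List Int) (terreno : List (List String)) : Prop :=
  3 ≤ quadrado.length
instance (quadrado : List Int) (terreno : List (List String)) : Decidable (Pre_marcaQuadrado quadrado terreno) := by unfold Pre_marcaQuadrado; infer_instance

def pvWitness_marcaQuadrado : List Int × List (List String) :=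
  ([1, 1, 1], [[".", ".", "."], [".", ".", "."], [".", ".", "."]])

def Spec_marcaQuadrado (quadrado : List Int) (terreno : List (List String)) (out : List (List String)) : Prop := out = marcaQuadrado_alt quadrado terreno
instance (quadrado : List Int) (terreno : List (List String)) (out : List (List String)) : Decidable (Spec_marcaQuadrado quadrado terreno out) := by unfold Spec_marcaQuadrado; infer_instance

-- ===== CLAIM (what is proved, stated in full; the proofs are below) =====
def Claim_equal_marcaQuadrado : Prop := ∀ (quadrado : List Int) (terreno : List (List String)), Dom_marcaQuadrado quadrado terreno → Pre_marcaQuadrado quadrado terreno → Spec_marcaQuadrado quadrado terreno (marcaQuadrado quadrado terreno)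

-- ===== LEMMAS AND PROOFS =====

-- cell access with defaults
def gget (g : List (List String)) (a b : Nat) : String := (g.getD a []).getD b ""

lemma getD_eq_nil_of_le (g : List (List String)) (a : Nat) (h : g.length <= a) :
    g.getD a [] = [] := by
  simp [List.getD_eq_getElem?_getD, List.getElem?_eq_none h]

-- setting one cell: row lengths unchanged
lemma rowlen_set (g : List (List String)) (i j : Nat) (a : Nat) :
    (((g.set i ((g.getD i []).set j "*")).getD a []).length) = ((g.getD a []).length) := by
  by_cases h : a = i
  · subst h
    by_cases hl : a < g.length
    · simp [List.getD_eq_getElem?_getD, hl]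
    · simp [List.getD_eq_getElem?_getD, List.getElem?_eq_none (by simpa using not_lt.mp hl),
        List.set_eq_of_length_le (not_lt.mp hl)]
  · simp [List.getD_eq_getElem?_getD, List.getElem?_set_ne (fun hh => h hh.symm)]

-- gget of a one-cell set
lemma gget_set (g : List (List String)) (i j a b : Nat) :
    gget (g.set i ((g.getD i []).set j "*")) a b
      = if a = i ∧ b = j ∧ b < (g.getD a []).length then "*" else gget g a b := by
  unfold gget
  by_cases h : i = a
  · subst h
    by_cases hl : i < g.length
    · have hg : g[i]? = some g[i] := List.getElem?_eq_getElem hl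
      simp only [List.getD_eq_getElem?_getD, List.getElem?_set, if_pos hl,
        Option.getD_some, hg]
      by_cases hb : j = b
      · subst hb
        by_cases hr : j < g[i].length
        · simp [hr]
        · simp [hr]
      · simp [hb]
        intro h1 h2; omega
    · rw [List.set_eq_of_length_le (le_of_not_gt (by simpa using hl))]
      have : g[i]? = none := List.getElem?_eq_none (le_of_not_gt (by simpa using hl))
      simp [List.getD_eq_getElem?_getD, this]
  · simp only [List.getD_eq_getElem?_getD, List.getElem?_set, if_neg h]
    have : ¬ (a = i ∧ b = j ∧ b < (g[a]?.getD []).length) := by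
      rintro ⟨h1, -, -⟩; exact h h1.symm
    simp [this]

lemma rowlen_markCell (g : List (List String)) (i j : Int) (a : Nat) :
    ((markCell g i j).getD a []).length = (g.getD a []).length := by
  unfold markCell; split
  · exact rowlen_set g i.toNat j.toNat a
  · rfl

lemma length_markCell (g : List (List String)) (i j : Int) :
    (markCell g i j).length = g.length := by
  unfold markCell; split <;> simp

lemma gget_markCell (g : List (List String)) (i j : Int) (a b : Nat) :
    gget (markCell g i j) a b
      = if (a : Int) = i ∧ (b : Int) = j ∧ b < (g.getD a []).length then "*" else gget g a b := by
  unfold markCell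
  split
  · next hg =>
    rw [gget_set]
    obtain ⟨h0i, hil, h0j, hjl⟩ := hg
    have hiff : (a = i.toNat ∧ b = j.toNat ∧ b < (g.getD a []).length)
        ↔ ((a : Int) = i ∧ (b : Int) = j ∧ b < (g.getD a []).length) := by
      constructor <;> (rintro ⟨h1, h2, h3⟩; exact ⟨by omega, by omega, h3⟩)
    rw [if_congr hiff rfl rfl]
  · next hg =>
    have hneg : ¬ ((a : Int) = i ∧ (b : Int) = j ∧ b < (g.getD a []).length) := by
      rintro ⟨h1, h2, h3⟩
      apply hg
      have ha : a < g.length := by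
        by_contra hh
        rw [getD_eq_nil_of_le g a (by omega)] at h3
        simp at h3
      have hta : i.toNat = a := by omega
      refine ⟨by omega, by omega, by omega, ?_⟩
      rw [hta]; omega
    rw [if_neg hneg]

-- fold invariants: row lengths and grid length are preserved
lemma rowlen_foldl {β : Type} (js : List β) (f : List (List String) → β → List (List String))
    (hf : ∀ g j a, ((f g j).getD a []).length = (g.getD a []).length)
    (g : List (List String)) (a : Nat) :
    ((js.foldl f g).getD a []).length = (g.getD a []).length := by
  induction js generalizing g with
  | nil => rfl
  | cons j rest ih => simp only [List.foldl_cons]; rw [ih, hf]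

lemma length_foldl {β : Type} (js : List β) (f : List (List String) → β → List (List String))
    (hf : ∀ g j, (f g j).length = g.length)
    (g : List (List String)) :
    (js.foldl f g).length = g.length := by
  induction js generalizing g with
  | nil => rfl
  | cons j rest ih => simp only [List.foldl_cons]; rw [ih, hf]

-- single set inside a row
lemma row_set (row : List String) (j b : Nat) :
    (row.set j "*").getD b "" = if b = j ∧ b < row.length then "*" else row.getD b "" := by
  by_cases h : j = b
  · subst h
    by_cases hl : j < row.length <;>
      simp [List.getD_eq_getElem?_getD, hl]
  · simp [List.getD_eq_getElem?_getD, h]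
    intro h1 h2
    omega

lemma row_fold_len (js : List Int) (row : List String) :
    (js.foldl (fun r j => r.set j.toNat "*") row).length = row.length := by
  induction js generalizing row with
  | nil => rfl
  | cons j rest ih => simp [ih]

lemma row_fold (js : List Int) (row : List String) (b : Nat) (hnn : ∀ j ∈ js, 0 ≤ j) :
    ((js.foldl (fun r j => r.set j.toNat "*") row).getD b "")
      = if (b : Int) ∈ js ∧ b < row.length then "*" else row.getD b "" := by
  induction js generalizing row with
  | nil => simp
  | cons j rest ih =>
    simp only [List.foldl_cons]
    rw [ih _ (fun j' hj' => hnn j' (List.mem_cons_of_mem _ hj')), List.length_set, row_set]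
    have h0j : 0 ≤ j := hnn j List.mem_cons_self
    have hbj : b = j.toNat ↔ (b : Int) = j := by omega
    simp only [List.mem_cons, hbj]
    split_ifs <;> tauto

lemma length_markRow (g : List (List String)) (i j0 j1 : Int) :
    (markRow g i j0 j1).length = g.length := by
  unfold markRow; split <;> simp

lemma rowlen_markRow (g : List (List String)) (i j0 j1 : Int) (a : Nat) :
    ((markRow g i j0 j1).getD a []).length = (g.getD a []).length := by
  unfold markRow; split
  · next hg =>
    obtain ⟨h0i, hil⟩ := hg
    by_cases h : a = i.toNat
    · subst h
      have hlt : i.toNat < g.length := by omega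
      simp [List.getD_eq_getElem?_getD, List.getElem?_set_self hlt, row_fold_len]
    · simp [List.getD_eq_getElem?_getD, List.getElem?_set_ne (fun hh => h hh.symm)]
  · rfl

lemma gget_markRow (g : List (List String)) (i j0 j1 : Int) (a b : Nat) :
    gget (markRow g i j0 j1) a b
      = if (a : Int) = i ∧ j0 ≤ (b : Int) ∧ (b : Int) ≤ j1 ∧ b < (g.getD a []).length
        then "*" else gget g a b := by
  unfold markRow gget
  split
  · next hg =>
    obtain ⟨h0i, hil⟩ := hg
    by_cases h : a = i.toNat
    · subst h
      have hlt : i.toNat < g.length := by omega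
      simp only [List.getD_eq_getElem?_getD, List.getElem?_set_self hlt, Option.getD_some]
      rw [← List.getD_eq_getElem?_getD,
        row_fold _ _ _ (fun j' hj' => by
          rw [PySem.List.mem_pyRange_one] at hj'; omega)]
      simp only [PySem.List.mem_pyRange_one]
      rw [List.getD_eq_getElem?_getD]
      split_ifs <;> first | rfl | (exfalso; omega)
    · have hne : ¬ ((a : Int) = i ∧ j0 ≤ (b : Int) ∧ (b : Int) ≤ j1
          ∧ b < ((g.getD a []).length)) := by
        rintro ⟨h1, -, -, -⟩; exact h (by omega)
      rw [if_neg hne]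
      simp [List.getD_eq_getElem?_getD, List.getElem?_set_ne (fun hh => h hh.symm)]
  · next hg =>
    have hne : ¬ ((a : Int) = i ∧ j0 ≤ (b : Int) ∧ (b : Int) ≤ j1
        ∧ b < ((g.getD a []).length)) := by
      rintro ⟨h1, h2, h3, h4⟩
      apply hg
      have ha : a < g.length := by
        by_contra hh
        rw [getD_eq_nil_of_le g a (le_of_not_gt hh)] at h4
        simp at h4
      exact ⟨by omega, by omega⟩
    rw [if_neg hne]

-- B's second loop: the two vertical edges of the ring (corners excluded)
lemma gget_foldB2 (ymt ypt : Int) (is : List Int) (g : List (List String)) (a b : Nat) :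
    gget (is.foldl (fun g i => markCell (markCell g i ymt) i ypt) g) a b
      = if (a : Int) ∈ is ∧ ((b : Int) = ymt ∨ (b : Int) = ypt) ∧ b < (g.getD a []).length
        then "*" else gget g a b := by
  induction is generalizing g with
  | nil => simp
  | cons i rest ih =>
    simp only [List.foldl_cons]
    rw [ih]
    rw [rowlen_markCell, rowlen_markCell, gget_markCell, rowlen_markCell, gget_markCell]
    simp only [List.mem_cons]
    split_ifs <;> tauto

-- A's inner loop over one row
lemma gget_foldA_inner (x y tamanho : Int) (i : Nat) (js : List Nat)
    (g : List (List String)) (a b : Nat) :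
    gget (js.foldl (fun (g' : List (List String)) (j : Nat) =>
        if calculaDistancia (x, y) ((i : Int), (j : Int)) = tamanho then
          g'.set i ((g'.getD i []).set j "*")
        else g') g) a b
      = if a = i ∧ b ∈ js ∧ calculaDistancia (x, y) ((i : Int), (b : Int)) = tamanho
            ∧ b < (g.getD a []).length
        then "*" else gget g a b := by
  induction js generalizing g with
  | nil => simp
  | cons j rest ih =>
    simp only [List.foldl_cons]
    by_cases hd : calculaDistancia (x, y) ((i : Int), (j : Int)) = tamanho
    · rw [if_pos hd, ih, rowlen_set, gget_set]
      simp only [List.mem_cons]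
      by_cases hbj : b = j
      · subst hbj
        split_ifs <;> tauto
      · split_ifs <;> tauto
    · rw [if_neg hd, ih]
      simp only [List.mem_cons]
      by_cases hbj : b = j
      · subst hbj
        split_ifs <;> tauto
      · split_ifs <;> tauto

-- row lengths / length preserved by A's inner loop
lemma rowlen_foldA_inner (x y tamanho : Int) (i : Nat) (js : List Nat)
    (g : List (List String)) (a : Nat) :
    ((js.foldl (fun (g' : List (List String)) (j : Nat) =>
        if calculaDistancia (x, y) ((i : Int), (j : Int)) = tamanho then
          g'.set i ((g'.getD i []).set j "*")
        else g') g).getD a []).length = ((g.getD a []).length) := by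
  apply rowlen_foldl
  intro g' j a'
  split
  · exact rowlen_set g' i j a'
  · rfl

-- A's outer loop
lemma gget_foldA_outer (x y tamanho : Int) (is : List Nat)
    (g : List (List String)) (a b : Nat) :
    gget (is.foldl (fun (g : List (List String)) (i : Nat) =>
        (List.range (g.getD i []).length).foldl (fun (g' : List (List String)) (j : Nat) =>
          if calculaDistancia (x, y) ((i : Int), (j : Int)) = tamanho then
            g'.set i ((g'.getD i []).set j "*")
          else g') g) g) a b
      = if a ∈ is ∧ calculaDistancia (x, y) ((a : Int), (b : Int)) = tamanho
            ∧ b < (g.getD a []).length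
        then "*" else gget g a b := by
  induction is generalizing g with
  | nil => simp
  | cons i rest ih =>
    simp only [List.foldl_cons]
    rw [ih, rowlen_foldA_inner, gget_foldA_inner]
    simp only [List.mem_cons, List.mem_range]
    by_cases hai : a = i
    · subst hai
      split_ifs <;> tauto
    · split_ifs <;> tauto

lemma rowlen_foldA_outer (x y tamanho : Int) (is : List Nat)
    (g : List (List String)) (a : Nat) :
    ((is.foldl (fun (g : List (List String)) (i : Nat) =>
        (List.range (g.getD i []).length).foldl (fun (g' : List (List String)) (j : Nat) =>
          if calculaDistancia (x, y) ((i : Int), (j : Int)) = tamanho then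
            g'.set i ((g'.getD i []).set j "*")
          else g') g) g).getD a []).length = (g.getD a []).length := by
  apply rowlen_foldl
  intro g' i a'
  exact rowlen_foldA_inner x y tamanho i _ g' a'

-- the ring condition is exactly "Chebyshev distance = tamanho"
lemma ring_iff (x y tamanho : Int) (a b : Int) :
    calculaDistancia (x, y) (a, b) = tamanho
      ↔ (x - tamanho + 1 ≤ a ∧ a < x + tamanho ∧ (b = y - tamanho ∨ b = y + tamanho))
        ∨ ((a = x - tamanho ∨ a = x + tamanho) ∧ y - tamanho ≤ b ∧ b < y + tamanho + 1) := by
  unfold calculaDistancia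
  simp only
  rcases le_total |x - a| |y - b| with h | h
  · rw [max_eq_right h]
    rw [Int.abs_eq_natAbs, Int.abs_eq_natAbs] at *
    omega
  · rw [max_eq_left h]
    rw [Int.abs_eq_natAbs, Int.abs_eq_natAbs] at *
    omega

-- grid extensionality through gget
lemma grid_ext (g₁ g₂ : List (List String))
    (hl : g₁.length = g₂.length)
    (hr : ∀ a, (g₁.getD a []).length = (g₂.getD a []).length)
    (h : ∀ a b, gget g₁ a b = gget g₂ a b) : g₁ = g₂ := by
  apply List.ext_getElem hl
  intro a h1 h2
  apply List.ext_getElem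
  · have := hr a
    simpa [List.getD_eq_getElem?_getD, List.getElem?_eq_getElem, h1, h2] using this
  · intro b hb1 hb2
    have := h a b
    unfold gget at this
    simpa [List.getD_eq_getElem?_getD, List.getElem?_eq_getElem, h1, h2, hb1, hb2] using this

-- ===== VERDICT (by name: the statement is the Claim_ definition above) =====
theorem marcaQuadrado_spec : Claim_equal_marcaQuadrado := by
  intro quadrado terreno _ hpre
  unfold Spec_marcaQuadrado
  match quadrado, hpre with
  | q0 :: q1 :: q2 :: qs, _ =>
  have h0 : PySem.List.pyGet? (q0 :: q1 :: q2 :: qs) 0 = some q0 := by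
    simp [PySem.List.pyGet?, PySem.List.pyIdx?]
    rw [if_pos (by omega)]
    simp
  have h1 : PySem.List.pyGet? (q0 :: q1 :: q2 :: qs) 1 = some q1 := by
    simp [PySem.List.pyGet?, PySem.List.pyIdx?]
    rw [if_pos (by omega)]
    simp
  have h2 : PySem.List.pyGet? (q0 :: q1 :: q2 :: qs) 2 = some q2 := by
    simp [PySem.List.pyGet?, PySem.List.pyIdx?]
    rw [if_pos (by omega)]
    simp
  unfold marcaQuadrado marcaQuadrado_alt
  rw [h0, h1, h2]
  dsimp only
  apply grid_ext
  · rw [length_foldl _ _ (fun g i => length_foldl _ _ (fun g' j => by split <;> simp) g)]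
    rw [length_foldl _ _ (fun g i => by rw [length_markCell, length_markCell]),
        length_markRow, length_markRow]
  · intro a
    rw [rowlen_foldA_outer]
    rw [rowlen_foldl _ _ (fun g i a' => by rw [rowlen_markCell, rowlen_markCell]),
        rowlen_markRow, rowlen_markRow]
  · intro a b
    rw [gget_foldA_outer, gget_foldB2, rowlen_markRow, rowlen_markRow,
        gget_markRow, rowlen_markRow, gget_markRow]
    simp only [List.mem_range, PySem.List.mem_pyRange_one]
    have hring := ring_iff q1 q2 q0 (a : Int) (b : Int)
    have hb0 : b < (terreno.getD a []).length → a < terreno.length := by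
      intro h
      by_contra hh
      rw [getD_eq_nil_of_le terreno a (le_of_not_gt hh)] at h
      simp at h
    split_ifs <;> first | rfl | (exfalso; omega)
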